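-- pv_equiv track=rewrite | github.com/UnsafePointer/advent-of-code-2021 | 23/P2.py | get_possible_hallway_locations_for_room_exit
-- ===== SOURCE A (Python) =====
-- from typing import Set, Tuple, Dict, List, FrozenSet
--
-- def is_vertial_location_in_hallway(y: int) -> bool:
--     return y == 4
--
-- def get_possible_hallway_locations_for_room_exit(
--     state: FrozenSet[Tuple[str, int, int]], x: int
-- ) -> Set[Tuple[int, int]]:
--     min_x = 0
--     max_x = 10
--     for (_, _x, _y) in state:
--         if not is_vertial_location_in_hallway(_y):
--             continue
--         if _x < x:
--             min_x = max(min_x, _x + 1)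
--         if _x > x:
--             max_x = min(max_x, _x - 1)
--     possible_locations: Set[Tuple[int, int]] = set()
--     for _x in range(min_x, max_x + 1):
--         if _x in [2, 4, 6, 8]:  # they can't be in front of the door
--             continue
--         possible_locations.add((_x, 4))
--     return possible_locations
-- ===== SOURCE B (Python) =====
-- def get_possible_hallway_locations_for_room_exit(state, x):
--     occupied = {px for (_, px, py) in state if py == 4}
--
--     def reachable(p):
--         if p < x:
--             return not any(p <= q < x for q in occupied)
--         if p > x:
--             return not any(x < q <= p for q in occupied)
--         return True
--
--     return {(p, 4) for p in (0, 1, 3, 5, 7, 9, 10) if reachable(p)}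
-- ===== Notes on version B (the rewrite author's own statement) =====
-- stated objective: alternative
-- what changed: Instead of shrinking [min_x,max_x] bounds over the occupants and then enumerating a range, B tests each of the seven fixed non-door hallway cells for an unobstructed path (no hallway occupant strictly between it and x).
import Mathlib
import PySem

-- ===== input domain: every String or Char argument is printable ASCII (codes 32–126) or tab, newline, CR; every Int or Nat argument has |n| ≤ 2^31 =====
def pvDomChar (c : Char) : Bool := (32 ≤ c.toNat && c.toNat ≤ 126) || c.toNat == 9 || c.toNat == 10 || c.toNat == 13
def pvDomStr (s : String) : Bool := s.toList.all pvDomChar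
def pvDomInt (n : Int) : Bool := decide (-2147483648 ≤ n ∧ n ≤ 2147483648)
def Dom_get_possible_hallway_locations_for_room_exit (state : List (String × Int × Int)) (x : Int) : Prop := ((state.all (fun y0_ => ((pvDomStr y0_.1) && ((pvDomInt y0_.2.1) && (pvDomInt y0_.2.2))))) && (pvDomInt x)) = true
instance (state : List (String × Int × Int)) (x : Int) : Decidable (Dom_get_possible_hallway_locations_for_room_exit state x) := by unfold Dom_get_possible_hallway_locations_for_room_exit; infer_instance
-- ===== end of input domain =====

-- B replaces A's bound-shrinking pass + range enumeration by a per-candidate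
-- obstruction test over the seven fixed non-door hallway cells (alternative
-- decomposition, same return value; A's Python returns a set, compared as a set).

-- ===== PORT A =====
def is_vertial_location_in_hallway (y : Int) : Bool := y == 4

def pvBoundsStep (x : Int) (b : Int × Int) (t : String × Int × Int) : Int × Int :=
  if !(is_vertial_location_in_hallway t.2.2) then b
  else
    let b1 := if t.2.1 < x then (max b.1 (t.2.1 + 1), b.2) else b
    if t.2.1 > x then (b1.1, min b1.2 (t.2.1 - 1)) else b1

def get_possible_hallway_locations_for_room_exit (state : List (String × Int × Int)) (x : Int) : List (Int × Int) :=
  let b := state.foldl (pvBoundsStep x) (0, 10)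
  (PySem.List.pyRange b.1 (b.2 + 1) 1).foldl
    (fun acc p => if p = 2 ∨ p = 4 ∨ p = 6 ∨ p = 8 then acc else PySem.Set.add acc (p, 4))
    ([] : List (Int × Int))

-- ===== PORT B =====
def pvReachable (occupied : List Int) (x p : Int) : Bool :=
  if p < x then !(occupied.any (fun q => decide (p ≤ q) && decide (q < x)))
  else if x < p then !(occupied.any (fun q => decide (x < q) && decide (q ≤ p)))
  else true

def get_possible_hallway_locations_for_room_exit_alt (state : List (String × Int × Int)) (x : Int) : List (Int × Int) :=
  let occupied : PySem.Set Int :=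
    PySem.Set.ofList ((state.filter (fun t => t.2.2 == 4)).map (fun t => t.2.1))
  -- set comprehension over the distinct, ascending candidates: builds exactly this list
  (([0, 1, 3, 5, 7, 9, 10] : List Int).filter (fun p => pvReachable occupied x p)).map
    (fun p => (p, 4))

-- ===== PRECONDITION & SPEC =====
def Spec_get_possible_hallway_locations_for_room_exit (state : List (String × Int × Int)) (x : Int) (out : List (Int × Int)) : Prop := out = get_possible_hallway_locations_for_room_exit_alt state x
instance (state : List (String × Int × Int)) (x : Int) (out : List (Int × Int)) : Decidable (Spec_get_possible_hallway_locations_for_room_exit state x out) := by unfold Spec_get_possible_hallway_locations_for_room_exit; infer_instance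

-- ===== CLAIM (what is proved, stated in full; the proofs are below) =====
def Claim_equal_get_possible_hallway_locations_for_room_exit : Prop := ∀ (state : List (String × Int × Int)) (x : Int), Dom_get_possible_hallway_locations_for_room_exit state x → Spec_get_possible_hallway_locations_for_room_exit state x (get_possible_hallway_locations_for_room_exit state x)

-- ===== LEMMAS AND PROOFS =====

theorem pvStep_fst (x : Int) (b : Int × Int) (t : String × Int × Int) :
    (pvBoundsStep x b t).1 = if t.2.2 = 4 ∧ t.2.1 < x then max b.1 (t.2.1 + 1) else b.1 := by
  simp only [pvBoundsStep, is_vertial_location_in_hallway]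
  split_ifs <;> simp_all

theorem pvStep_snd (x : Int) (b : Int × Int) (t : String × Int × Int) :
    (pvBoundsStep x b t).2 = if t.2.2 = 4 ∧ x < t.2.1 then min b.2 (t.2.1 - 1) else b.2 := by
  simp only [pvBoundsStep, is_vertial_location_in_hallway]
  split_ifs <;> simp_all

theorem pvFold_fst_le (x : Int) (st : List (String × Int × Int)) :
    ∀ (b : Int × Int) (p : Int),
      (st.foldl (pvBoundsStep x) b).1 ≤ p ↔
        (b.1 ≤ p ∧ ∀ t ∈ st, t.2.2 = 4 → t.2.1 < x → t.2.1 < p) := by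
  induction st with
  | nil => simp
  | cons t st ih =>
    intro b p
    simp only [List.foldl_cons, ih, pvStep_fst, List.mem_cons]
    constructor
    · rintro ⟨h1, h2⟩
      split_ifs at h1 with h <;>
        exact ⟨by omega, by rintro u (rfl | hu) h4 hx <;> first | omega | exact h2 u hu h4 hx⟩
    · rintro ⟨h1, h2⟩
      refine ⟨?_, fun u hu h4 hx => h2 u (Or.inr hu) h4 hx⟩
      split_ifs with h
      · have := h2 t (Or.inl rfl) h.1 h.2; omega
      · exact h1

theorem pvFold_le_snd (x : Int) (st : List (String × Int × Int)) :
    ∀ (b : Int × Int) (p : Int),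
      p ≤ (st.foldl (pvBoundsStep x) b).2 ↔
        (p ≤ b.2 ∧ ∀ t ∈ st, t.2.2 = 4 → x < t.2.1 → p < t.2.1) := by
  induction st with
  | nil => simp
  | cons t st ih =>
    intro b p
    simp only [List.foldl_cons, ih, pvStep_snd, List.mem_cons]
    constructor
    · rintro ⟨h1, h2⟩
      split_ifs at h1 with h <;>
        exact ⟨by omega, by rintro u (rfl | hu) h4 hx <;> first | omega | exact h2 u hu h4 hx⟩
    · rintro ⟨h1, h2⟩
      refine ⟨?_, fun u hu h4 hx => h2 u (Or.inr hu) h4 hx⟩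
      split_ifs with h
      · have := h2 t (Or.inl rfl) h.1 h.2; omega
      · exact h1

def pvNondoor (p : Int) : Bool := !(p == 2 || p == 4 || p == 6 || p == 8)

theorem pvBuild_eq (l : List Int) (hp : l.Pairwise (· < ·)) :
    ∀ (acc : List (Int × Int)), (∀ q ∈ l, ((q, (4 : Int)) ∉ acc)) →
      l.foldl (fun acc p => if p = 2 ∨ p = 4 ∨ p = 6 ∨ p = 8 then acc else PySem.Set.add acc (p, 4)) acc
        = acc ++ (l.filter pvNondoor).map (fun p => (p, 4)) := by
  induction l with
  | nil => simp
  | cons q l ih =>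
    intro acc hacc
    have hp' := (List.pairwise_cons.mp hp).2
    have hq := (List.pairwise_cons.mp hp).1
    simp only [List.foldl_cons, List.filter_cons]
    by_cases hdoor : q = 2 ∨ q = 4 ∨ q = 6 ∨ q = 8
    · have : pvNondoor q = false := by simp [pvNondoor]; omega
      rw [if_pos hdoor, this]
      exact ih hp' acc (fun u hu => hacc u (List.mem_cons_of_mem _ hu))
    · have : pvNondoor q = true := by simp [pvNondoor]; push Not at hdoor; omega
      rw [if_neg hdoor, this]
      rw [PySem.Set.add_of_not_mem (hacc q (List.mem_cons_self))]
      rw [ih hp' (acc ++ [(q, 4)]) ?_]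
      · simp
      · intro u hu
        have := hq u hu
        simp only [List.mem_append, List.mem_singleton]
        rintro (h | h)
        · exact hacc u (List.mem_cons_of_mem _ hu) h
        · simp at h; omega

-- membership in the candidate list
theorem pvMem_candidates (p : Int) :
    p ∈ ([0, 1, 3, 5, 7, 9, 10] : List Int) ↔ (0 ≤ p ∧ p ≤ 10 ∧ pvNondoor p = true) := by
  simp [pvNondoor]
  omega

theorem pvReachable_iff (occ : List Int) (x p : Int) :
    pvReachable occ x p = true ↔
      (∀ q ∈ occ, q < x → q < p) ∧ (∀ q ∈ occ, x < q → p < q) := by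
  simp only [pvReachable]
  split_ifs with h1 h2
  · simp only [Bool.not_eq_eq_eq_not, Bool.not_true, List.any_eq_false]
    constructor
    · intro h
      refine ⟨fun q hq hx => ?_, fun q hq hx => by omega⟩
      have := h q hq; simp at this; omega
    · intro ⟨ha, _⟩ q hq
      simp only [Bool.and_eq_true, decide_eq_true_eq]
      intro hpq
      exact absurd (ha q hq hpq.2) (by omega)
  · simp only [Bool.not_eq_eq_eq_not, Bool.not_true, List.any_eq_false]
    constructor
    · intro h
      refine ⟨fun q hq hx => by omega, fun q hq hx => ?_⟩
      have := h q hq; simp at this; omega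
    · intro ⟨_, hb⟩ q hq
      simp only [Bool.and_eq_true, decide_eq_true_eq]
      intro hpq
      exact absurd (hb q hq hpq.1) (by omega)
  · have hxp : p = x := by omega
    subst hxp
    constructor
    · intro _
      exact ⟨fun q _ h => by omega, fun q _ h => by omega⟩
    · intro _; rfl

theorem pvOcc_mem (state : List (String × Int × Int)) (q : Int) :
    q ∈ PySem.Set.ofList ((state.filter (fun t => t.2.2 == 4)).map (fun t => t.2.1)) ↔
      ∃ t ∈ state, t.2.2 = 4 ∧ t.2.1 = q := by
  simp [PySem.Set.mem_ofList, List.mem_map, List.mem_filter]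

-- two strictly increasing lists with the same members are equal
theorem pvSortedExt : ∀ (l₁ l₂ : List Int), l₁.Pairwise (· < ·) → l₂.Pairwise (· < ·) →
    (∀ p, p ∈ l₁ ↔ p ∈ l₂) → l₁ = l₂ := by
  intro l₁
  induction l₁ with
  | nil =>
    intro l₂ _ _ hmem
    cases l₂ with
    | nil => rfl
    | cons b t => exact absurd ((hmem b).mpr (List.mem_cons_self)) (List.not_mem_nil)
  | cons a l₁ ih =>
    intro l₂ h₁ h₂ hmem
    cases l₂ with
    | nil => exact absurd ((hmem a).mp (List.mem_cons_self)) (List.not_mem_nil)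
    | cons b t =>
      have hab : a = b := by
        rcases List.mem_cons.mp ((hmem a).mp (List.mem_cons_self)) with h | h
        · exact h
        · rcases List.mem_cons.mp ((hmem b).mpr (List.mem_cons_self)) with h' | h'
          · omega
          · have := (List.pairwise_cons.mp h₁).1 b h'
            have := (List.pairwise_cons.mp h₂).1 a h
            omega
      subst hab
      have htail : ∀ p, p ∈ l₁ ↔ p ∈ t := by
        intro p
        constructor
        · intro hp
          have hlt := (List.pairwise_cons.mp h₁).1 p hp
          rcases List.mem_cons.mp ((hmem p).mp (List.mem_cons_of_mem _ hp)) with h | h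
          · omega
          · exact h
        · intro hp
          have hlt := (List.pairwise_cons.mp h₂).1 p hp
          rcases List.mem_cons.mp ((hmem p).mpr (List.mem_cons_of_mem _ hp)) with h | h
          · omega
          · exact h
      rw [ih t (List.pairwise_cons.mp h₁).2 (List.pairwise_cons.mp h₂).2 htail]

-- ===== VERDICT (by name: the statement is the Claim_ definition above) =====
theorem get_possible_hallway_locations_for_room_exit_spec :
    Claim_equal_get_possible_hallway_locations_for_room_exit := by
  intro state x _
  unfold Spec_get_possible_hallway_locations_for_room_exit
  unfold get_possible_hallway_locations_for_room_exit get_possible_hallway_locations_for_room_exit_alt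
  simp only []
  have hrangePW : (PySem.List.pyRange (state.foldl (pvBoundsStep x) (0, 10)).1
      ((state.foldl (pvBoundsStep x) (0, 10)).2 + 1) 1).Pairwise (· < ·) :=
    PySem.List.pairwise_lt_pyRange_one _ _
  rw [pvBuild_eq _ hrangePW [] (by simp)]
  simp only [List.nil_append]
  refine congrArg (List.map _) ?_
  have hfst := pvFold_fst_le x state (0, 10)
  have hsnd := pvFold_le_snd x state (0, 10)
  have hm0 : (0 : Int) ≤ (state.foldl (pvBoundsStep x) (0, 10)).1 :=
    ((hfst _).mp le_rfl).1
  have hM10 : (state.foldl (pvBoundsStep x) (0, 10)).2 ≤ 10 :=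
    ((hsnd _).mp le_rfl).1
  apply pvSortedExt
  · exact hrangePW.filter _
  · exact List.Pairwise.filter _ (by decide)
  · intro p
    simp only [List.mem_filter, PySem.List.mem_pyRange_one, pvMem_candidates, pvReachable_iff]
    constructor
    · rintro ⟨⟨hlo, hhi⟩, hnd⟩
      refine ⟨⟨by omega, by omega, hnd⟩, ?_, ?_⟩
      · intro q hq hqx
        rw [pvOcc_mem] at hq
        obtain ⟨t, ht, h4, rfl⟩ := hq
        exact ((hfst p).mp hlo).2 t ht h4 hqx
      · intro q hq hqx
        rw [pvOcc_mem] at hq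
        obtain ⟨t, ht, h4, rfl⟩ := hq
        exact ((hsnd p).mp (by omega)).2 t ht h4 hqx
    · rintro ⟨⟨hp0, hp10, hnd⟩, hleft, hright⟩
      refine ⟨⟨?_, ?_⟩, hnd⟩
      · exact (hfst p).mpr ⟨hp0, fun t ht h4 hx =>
          hleft t.2.1 ((pvOcc_mem state t.2.1).mpr ⟨t, ht, h4, rfl⟩) hx⟩
      · have : p ≤ (state.foldl (pvBoundsStep x) (0, 10)).2 :=
          (hsnd p).mpr ⟨by omega, fun t ht h4 hx =>
            hright t.2.1 ((pvOcc_mem state t.2.1).mpr ⟨t, ht, h4, rfl⟩) hx⟩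
        omega
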